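-- pv_equiv track=rewrite | github.com/Bekal17/BACKEND-BLOCK-ID | backend_blockid/oracle/flow_features.py | compute_rapid_tx_count
-- ===== SOURCE A (Python) =====
-- RAPID_TX_WINDOW_SEC = 30
--
-- def compute_rapid_tx_count(records: list[dict]) -> int:
--     """Count transactions that have at least one other tx within RAPID_TX_WINDOW_SEC."""
--     times = [r["blockTime"] for r in records if r.get("blockTime") is not None]
--     if not times:
--         return 0
--     times = sorted(times)
--     count = 0
--     for i, t in enumerate(times):
--         for j, u in enumerate(times):
--             if i != j and abs(u - t) <= RAPID_TX_WINDOW_SEC: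
--                 count += 1
--                 break
--     return count
-- ===== SOURCE B (Python) =====
-- RAPID_TX_WINDOW_SEC = 30
--
-- def compute_rapid_tx_count(records):
--     times = sorted(r["blockTime"] for r in records if r.get("blockTime") is not None)
--     n = len(times)
--     count = 0
--     for i in range(n):
--         near_prev = i > 0 and times[i] - times[i - 1] <= RAPID_TX_WINDOW_SEC
--         near_next = i + 1 < n and times[i + 1] - times[i] <= RAPID_TX_WINDOW_SEC
--         if near_prev or near_next:
--             count += 1
--     return count
-- ===== Notes on version B (the rewrite author's own statement) =====
-- stated objective: alternative
-- what changed: Replaced the all-pairs inner scan by a single pass over the sorted times checking only the adjacent predecessor/successor, which on a sorted list is equivalent to having any other tx within the window.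
import Mathlib
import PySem

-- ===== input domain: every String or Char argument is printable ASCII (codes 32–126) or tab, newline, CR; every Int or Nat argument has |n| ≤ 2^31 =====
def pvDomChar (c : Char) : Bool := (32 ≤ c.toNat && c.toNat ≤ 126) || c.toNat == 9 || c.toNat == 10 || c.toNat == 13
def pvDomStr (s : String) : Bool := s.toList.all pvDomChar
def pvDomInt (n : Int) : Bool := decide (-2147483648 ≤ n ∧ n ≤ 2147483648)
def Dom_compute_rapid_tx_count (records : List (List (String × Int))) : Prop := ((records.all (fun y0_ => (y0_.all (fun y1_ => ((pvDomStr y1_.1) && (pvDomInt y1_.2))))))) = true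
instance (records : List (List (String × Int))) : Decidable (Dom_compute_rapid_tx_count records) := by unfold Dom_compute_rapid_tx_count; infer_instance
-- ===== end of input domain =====

-- B replaces A's all-pairs inner scan by one adjacent-neighbor pass over the sorted times (alternative algorithm).


-- ===== PORT A =====
-- A: collect blockTime values (first-match dict lookup), sort, then for each element
-- scan ALL elements for another one within 30 seconds (break on first hit = List.any).
def compute_rapid_tx_count (records : List (List (String × Int))) : Int :=
  let times := records.filterMap (fun r => PySem.Dict.get? (PySem.Dict.mk r) "blockTime")
  if times = [] then 0
  else
    let ts := PySem.List.sorted times (fun x => x)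
    (PySem.List.enumerate ts).foldl
      (fun count it =>
        if (PySem.List.enumerate ts).any
            (fun ju => decide (it.1 ≠ ju.1 ∧ |ju.2 - it.2| ≤ 30)) then count + 1 else count) 0

-- ===== PORT B =====
-- B: same extraction and sort, then ONE pass over the indices checking only the adjacent
-- predecessor and successor (pyGetD's default 0 is unreachable: indices are guarded in range).
def compute_rapid_tx_count_alt (records : List (List (String × Int))) : Int :=
  let times := records.filterMap (fun r => PySem.Dict.get? (PySem.Dict.mk r) "blockTime")
  let ts := PySem.List.sorted times (fun x => x)
  let n : Int := PySem.List.len ts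
  (PySem.List.pyRange 0 n).foldl
    (fun count i =>
      let near_prev := 0 < i ∧ PySem.List.pyGetD ts i 0 - PySem.List.pyGetD ts (i-1) 0 ≤ 30
      let near_next := i + 1 < n ∧ PySem.List.pyGetD ts (i+1) 0 - PySem.List.pyGetD ts i 0 ≤ 30
      if near_prev ∨ near_next then count + 1 else count) 0

-- ===== PRECONDITION & SPEC =====
def Spec_compute_rapid_tx_count (records : List (List (String × Int))) (out : Int) : Prop := out = compute_rapid_tx_count_alt records
instance (records : List (List (String × Int))) (out : Int) : Decidable (Spec_compute_rapid_tx_count records out) := by unfold Spec_compute_rapid_tx_count; infer_instance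

-- ===== CLAIM (what is proved, stated in full; the proofs are below) =====
def Claim_equal_compute_rapid_tx_count : Prop := ∀ (records : List (List (String × Int))), Dom_compute_rapid_tx_count records → Spec_compute_rapid_tx_count records (compute_rapid_tx_count records)

-- ===== LEMMAS AND PROOFS =====

-- On the sorted list, "some OTHER index within 30 seconds" ↔ "adjacent predecessor or successor within 30".
theorem rapid_adj_char (times : List Int) (i : Int) (h0 : 0 ≤ i)
    (hn : i < ((PySem.List.sorted times (fun x => x)).length : Int)) :
    ((∃ j, (0 ≤ j ∧ j < ((PySem.List.sorted times (fun x => x)).length : Int)) ∧ i ≠ j ∧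
        |PySem.List.pyGetD (PySem.List.sorted times (fun x => x)) j 0 -
         PySem.List.pyGetD (PySem.List.sorted times (fun x => x)) i 0| ≤ 30) ↔
     ((0 < i ∧ PySem.List.pyGetD (PySem.List.sorted times (fun x => x)) i 0 -
               PySem.List.pyGetD (PySem.List.sorted times (fun x => x)) (i-1) 0 ≤ 30) ∨
      (i + 1 < ((PySem.List.sorted times (fun x => x)).length : Int) ∧
        PySem.List.pyGetD (PySem.List.sorted times (fun x => x)) (i+1) 0 -
        PySem.List.pyGetD (PySem.List.sorted times (fun x => x)) i 0 ≤ 30))) := by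
  have monoI : ∀ p q : Int, 0 ≤ p → p ≤ q →
      q < ((PySem.List.sorted times (fun x => x)).length : Int) →
      PySem.List.pyGetD (PySem.List.sorted times (fun x => x)) p 0 ≤
      PySem.List.pyGetD (PySem.List.sorted times (fun x => x)) q 0 := by
    intro p q hp hpq hq
    rw [PySem.List.pyGetD_eq_getElem _ 0 hp (by omega),
        PySem.List.pyGetD_eq_getElem _ 0 (by omega) hq]
    exact PySem.List.sorted_id_getElem_mono times (by omega) (by omega)
  constructor
  · rintro ⟨j, ⟨hj0, hjn⟩, hij, habs⟩
    rw [abs_le] at habs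
    rcases lt_or_gt_of_ne hij with hlt | hgt
    · -- i < j : the successor i+1 is also within the window
      right
      refine ⟨by omega, ?_⟩
      have h1 := monoI (i+1) j (by omega) (by omega) hjn
      omega
    · -- j < i : the predecessor i-1 is also within the window
      left
      refine ⟨by omega, ?_⟩
      have h1 := monoI j (i-1) hj0 (by omega) (by omega)
      omega
  · rintro (⟨hpos, hle⟩ | ⟨hlt, hle⟩)
    · refine ⟨i - 1, ⟨by omega, by omega⟩, by omega, ?_⟩
      have h1 := monoI (i-1) i (by omega) (by omega) hn
      rw [abs_le]; omega
    · refine ⟨i + 1, ⟨by omega, hlt⟩, by omega, ?_⟩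
      have h1 := monoI i (i+1) h0 (by omega) hlt
      rw [abs_le]; omega

-- ===== VERDICT (by name: the statement is the Claim_ definition above) =====
theorem compute_rapid_tx_count_spec : Claim_equal_compute_rapid_tx_count := by
  intro records _
  unfold Spec_compute_rapid_tx_count compute_rapid_tx_count compute_rapid_tx_count_alt
  set T := records.filterMap (fun r => PySem.Dict.get? (PySem.Dict.mk r) "blockTime") with hT
  by_cases hE : T = []
  · simp [hE, PySem.List.sorted, PySem.List.len, PySem.List.pyRange]
  · rw [if_neg hE]
    set ts := PySem.List.sorted T (fun x => x) with hts
    rw [PySem.List.foldl_if_add_one, PySem.List.foldl_ite_add_one]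
    simp only [PySem.List.len]
    congr 1
    norm_cast
    rw [PySem.List.enumerate_eq_map_pyRange ts 0, List.countP_map]
    apply List.countP_congr
    intro i hi
    rw [PySem.List.mem_pyRange_one] at hi
    simp only [Function.comp, List.any_map, List.any_eq_true, decide_eq_true_eq]
    simp only [PySem.List.len, PySem.List.mem_pyRange_one] at hi ⊢
    exact rapid_adj_char T i hi.1 hi.2
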